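-- pv_equiv track=rewrite | github.com/HeartoLazor/autotile_generator | autotile_generator.py | read_command
-- ===== SOURCE A (Python) =====
-- def read_command(commands, args):
-- 	args_size = len(args)
-- 	for i in range(0, args_size):
-- 		clean_arg = args[i].strip().lower()
-- 		for command in commands:
-- 			if(clean_arg == command):
-- 				return i
-- 	return -1
-- ===== SOURCE B (Python) =====
-- def read_command(commands, args):
--     first = {}
--     for i, a in enumerate(args):
--         key = a.strip().lower()
--         if key not in first:
--             first[key] = i
--     return min((first[c] for c in commands if c in first), default=-1)
-- ===== Notes on version B (the rewrite author's own statement) =====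
-- stated objective: alternative
-- what changed: B builds a dict from cleaned arg to its first index in one pass over args, then iterates commands looking up indices and returns their minimum (default -1), instead of A's nested scan of commands inside a scan of args.
import Mathlib
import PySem

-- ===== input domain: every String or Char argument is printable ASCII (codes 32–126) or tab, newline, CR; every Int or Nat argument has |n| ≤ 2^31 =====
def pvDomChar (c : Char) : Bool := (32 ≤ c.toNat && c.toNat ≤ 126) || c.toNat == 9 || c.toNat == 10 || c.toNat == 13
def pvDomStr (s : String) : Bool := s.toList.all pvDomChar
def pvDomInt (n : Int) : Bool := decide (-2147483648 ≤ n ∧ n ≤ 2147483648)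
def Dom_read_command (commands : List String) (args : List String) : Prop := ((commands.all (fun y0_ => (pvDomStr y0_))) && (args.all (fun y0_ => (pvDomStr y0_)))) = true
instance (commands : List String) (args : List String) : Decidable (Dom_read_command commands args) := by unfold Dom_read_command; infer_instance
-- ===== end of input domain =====

-- B replaces A's nested scan (args outer, commands inner) by a one-pass dict of first indices
-- keyed by cleaned arg, then a pass over commands taking the minimum index (default -1): alternative algorithm.


-- ===== PORT A =====
-- inner 'for command in commands: if clean_arg == command: return i'
def pvInnerA (clean_arg : String) (commands : List String) (i : Int) : Option Int :=
  match commands with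
  | [] => none
  | c :: rest => if clean_arg == c then some i else pvInnerA clean_arg rest i

-- outer 'for i in range(0, args_size)' over the indexed args
def pvOuterA (commands : List String) : List (Int × String) → Int
  | [] => -1
  | (i, a) :: rest =>
    match pvInnerA (PySem.Str.lower (PySem.Str.strip a)) commands i with
    | some r => r
    | none => pvOuterA commands rest

def read_command (commands : List String) (args : List String) : Int :=
  pvOuterA commands (PySem.List.enumerate args)

-- ===== PORT B =====
-- 'for i, a in enumerate(args): key = a.strip().lower(); if key not in first: first[key] = i'
def pvBuildB : List (Int × String) → PySem.Dict String Int → PySem.Dict String Int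
  | [], d => d
  | (i, a) :: rest, d =>
    let key := PySem.Str.lower (PySem.Str.strip a)
    pvBuildB rest (if d.contains key then d else d.insert key i)

-- min(xs, default=-1)
def pvMinD : List Int → Int
  | [] => -1
  | x :: xs => xs.foldl min x

def read_command_alt (commands : List String) (args : List String) : Int :=
  let first := pvBuildB (PySem.List.enumerate args) PySem.Dict.empty
  pvMinD (commands.filterMap (fun c => first.get? c))

-- ===== PRECONDITION & SPEC =====
def Spec_read_command (commands : List String) (args : List String) (out : Int) : Prop := out = read_command_alt commands args
instance (commands : List String) (args : List String) (out : Int) : Decidable (Spec_read_command commands args out) := by unfold Spec_read_command; infer_instance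

-- ===== CLAIM (what is proved, stated in full; the proofs are below) =====
def Claim_equal_read_command : Prop := ∀ (commands : List String) (args : List String), Dom_read_command commands args → Spec_read_command commands args (read_command commands args)

-- ===== LEMMAS AND PROOFS =====

def pvClean (a : String) : String := PySem.Str.lower (PySem.Str.strip a)

-- first index in an indexed list whose cleaned string is k
def pvFirstIdx : List (Int × String) → String → Option Int
  | [], _ => none
  | (i, a) :: rest, k => if pvClean a = k then some i else pvFirstIdx rest k

theorem pvInnerA_eq (k : String) (commands : List String) (i : Int) :
    pvInnerA k commands i = if k ∈ commands then some i else none := by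
  induction commands with
  | nil => simp [pvInnerA]
  | cons c rest ih =>
    simp only [pvInnerA, ih, List.mem_cons, beq_iff_eq]
    by_cases h : k = c <;> simp [h]

theorem pvBuildB_get? (l : List (Int × String)) (d : PySem.Dict String Int) (k : String) :
    (pvBuildB l d).get? k =
      match d.get? k with
      | some v => some v
      | none => pvFirstIdx l k := by
  induction l generalizing d with
  | nil => cases h : d.get? k <;> simp [pvBuildB, pvFirstIdx, h]
  | cons p rest ih =>
    obtain ⟨i, a⟩ := p
    simp only [pvBuildB]
    by_cases hc : d.contains (PySem.Str.lower (PySem.Str.strip a))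
    · rw [if_pos hc, ih]
      cases hg : d.get? k with
      | some v => rfl
      | none =>
        have hne : ¬ pvClean a = k := by
          intro he
          rw [PySem.Dict.contains_eq_isSome_get?] at hc
          rw [show PySem.Str.lower (PySem.Str.strip a) = k from he] at hc
          simp [hg] at hc
        simp only [pvFirstIdx, if_neg hne]
    · rw [if_neg hc, ih]
      rw [PySem.Dict.get?_insert]
      simp only [pvFirstIdx, pvClean]
      by_cases he : k = PySem.Str.lower (PySem.Str.strip a)
      · have hg : d.get? (PySem.Str.lower (PySem.Str.strip a)) = none := by
          have := PySem.Dict.contains_eq_isSome_get? (d := d) (k := PySem.Str.lower (PySem.Str.strip a))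
          cases hx : d.get? (PySem.Str.lower (PySem.Str.strip a)) with
          | none => rfl
          | some v => rw [hx] at this; simp at this; exact absurd this hc
        simp [he, hg]
      · have he' : ¬ PySem.Str.lower (PySem.Str.strip a) = k := fun h => he h.symm
        simp [he, he']

theorem pvFirstIdx_bound (l : List (Int × String)) (k : String) (j : Int)
    (h : pvFirstIdx l k = some j) : ∃ a, (j, a) ∈ l := by
  induction l with
  | nil => simp [pvFirstIdx] at h
  | cons p rest ih =>
    obtain ⟨i, a⟩ := p
    simp only [pvFirstIdx] at h
    by_cases hc : pvClean a = k
    · rw [if_pos hc] at h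
      exact ⟨a, by simp [← Option.some_inj.mp h]⟩
    · rw [if_neg hc] at h
      obtain ⟨b, hb⟩ := ih h
      exact ⟨b, List.mem_cons_of_mem _ hb⟩

theorem pvFoldlMin_eq (m : Int) (xs : List Int) : ∀ acc : Int,
    (m = acc ∨ m ∈ xs) → m ≤ acc → (∀ x ∈ xs, m ≤ x) → xs.foldl min acc = m := by
  induction xs with
  | nil =>
    intro acc hm hle _
    rcases hm with h | h
    · simp [h]
    · simp at h
  | cons x xs ih =>
    intro acc hm hle hall
    simp only [List.foldl_cons]
    have hx : m ≤ x := hall x (by simp)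
    rcases hm with h | h
    · exact ih (min acc x) (Or.inl (by omega)) (by omega) (fun y hy => hall y (by simp [hy]))
    · rcases List.mem_cons.mp h with h | h
      · exact ih (min acc x) (Or.inl (by omega)) (by omega) (fun y hy => hall y (by simp [hy]))
      · exact ih (min acc x) (Or.inr h) (by omega) (fun y hy => hall y (by simp [hy]))

theorem pvMinD_eq (m : Int) (xs : List Int) (hmem : m ∈ xs) (hall : ∀ j ∈ xs, m ≤ j) :
    pvMinD xs = m := by
  cases xs with
  | nil => simp at hmem
  | cons x xs =>
    simp only [pvMinD]
    refine pvFoldlMin_eq m xs x ?_ (hall x (by simp)) (fun y hy => hall y (by simp [hy]))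
    rcases List.mem_cons.mp hmem with h | h
    · exact Or.inl h
    · exact Or.inr h

set_option maxHeartbeats 1000000 in
theorem pvOuterA_eq_minD (commands : List String) (l : List (Int × String))
    (hp : l.Pairwise (fun p q => p.1 < q.1)) :
    pvOuterA commands l = pvMinD (commands.filterMap (pvFirstIdx l)) := by
  induction l with
  | nil =>
    have h : commands.filterMap (pvFirstIdx []) = [] := by
      rw [List.filterMap_eq_nil_iff]
      intro c _
      rfl
    rw [h]
    rfl
  | cons p rest ih =>
    obtain ⟨i, a⟩ := p
    rw [List.pairwise_cons] at hp
    obtain ⟨hlt, hrest⟩ := hp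
    simp only [pvOuterA, pvInnerA_eq]
    by_cases hmem : PySem.Str.lower (PySem.Str.strip a) ∈ commands
    · rw [if_pos hmem]
      refine (pvMinD_eq i _ ?_ ?_).symm
      · refine List.mem_filterMap.mpr ⟨PySem.Str.lower (PySem.Str.strip a), hmem, ?_⟩
        simp only [pvFirstIdx]
        have hself : pvClean a = PySem.Str.lower (PySem.Str.strip a) := rfl
        rw [if_pos hself]
      · intro j hj
        obtain ⟨c, _, hc⟩ := List.mem_filterMap.mp hj
        simp only [pvFirstIdx] at hc
        by_cases he : pvClean a = c
        · rw [if_pos he] at hc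
          have : i = j := Option.some.inj hc
          omega
        · rw [if_neg he] at hc
          obtain ⟨b, hb⟩ := pvFirstIdx_bound rest c j hc
          exact le_of_lt (hlt (j, b) hb)
    · rw [if_neg hmem]
      show pvOuterA commands rest = _
      rw [ih hrest]
      have hfm : List.filterMap (pvFirstIdx ((i, a) :: rest)) commands
          = List.filterMap (pvFirstIdx rest) commands := by
        apply List.filterMap_congr
        intro c hcm
        have hne : ¬ pvClean a = c := by
          intro he
          apply hmem
          show pvClean a ∈ commands
          rw [he]
          exact hcm
        simp only [pvFirstIdx, if_neg hne]
      rw [hfm]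

-- ===== VERDICT (by name: the statement is the Claim_ definition above) =====
theorem read_command_spec : Claim_equal_read_command := by
  intro commands args _
  unfold Spec_read_command read_command read_command_alt
  rw [pvOuterA_eq_minD commands _ (PySem.List.pairwise_lt_enumerate args 0)]
  congr 1
  apply List.filterMap_congr
  intro c _
  rw [pvBuildB_get? _ PySem.Dict.empty c]
  simp [PySem.Dict.get?_empty]
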